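-- pv_equiv track=rewrite | github.com/KIMHWANSEUNG/Algorithm | Python/codingtest/369.py | solution
-- ===== SOURCE A (Python) =====
-- def solution(num):
--     cnt = 0
--     for i in range(1,num+1):
--         s = str(i)
--         for x in s:
--             if (x=='3') or (x=='6') or (x=='9'):
--                 cnt+=1
--                 break
--     return cnt
-- ===== SOURCE B (Python) =====
-- def solution(num):
--     if num < 1:
--         return 0
--     DIGITS = (0, 1, 2, 4, 5, 7, 8)  # digits that are not 3, 6 or 9
--
--     def ok(n):
--         # True iff the decimal expansion of n avoids 3, 6 and 9
--         while n > 0: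
--             if n % 10 in (3, 6, 9):
--                 return False
--             n //= 10
--         return True
--
--     def count_ok(n):
--         # how many x in [0, n] have only digits from DIGITS
--         if n < 10:
--             return sum(1 for d in DIGITS if d <= n)
--         q, r = divmod(n, 10)
--         return count_ok(q - 1) * 7 + (sum(1 for d in DIGITS if d <= r) if ok(q) else 0)
--
--     return num - (count_ok(num) - 1)
-- ===== Notes on version B (the rewrite author's own statement) =====
-- stated objective: faster
-- what changed: Replaced the per-number string scan over the whole range with a digit-combinatorics recursion: count the numbers up to num whose decimal digits all avoid three/six/nine (seven choices per position, one recursive step per digit) and subtract that count from num.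
import Mathlib
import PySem

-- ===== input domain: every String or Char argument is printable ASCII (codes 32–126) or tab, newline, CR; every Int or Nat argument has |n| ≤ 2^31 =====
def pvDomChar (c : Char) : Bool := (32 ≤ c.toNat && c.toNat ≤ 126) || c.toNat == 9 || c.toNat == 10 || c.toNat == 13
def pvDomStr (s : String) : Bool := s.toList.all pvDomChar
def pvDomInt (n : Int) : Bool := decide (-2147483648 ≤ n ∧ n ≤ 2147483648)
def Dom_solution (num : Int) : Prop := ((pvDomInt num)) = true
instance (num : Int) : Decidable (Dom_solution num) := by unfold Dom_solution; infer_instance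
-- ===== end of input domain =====

-- B replaces A's per-number digit scan over range(1,num+1) by an O(log num) digit-combinatorics
-- count: num minus the count of numbers in [1,num] using only digits {0,1,2,4,5,7,8}.


-- ===== PORT A =====
-- the inner 'for x in s: if …: cnt+=1; break' increments cnt once iff some char of s is 3/6/9
def solution (num : Int) : Int :=
  (PySem.List.pyRange 1 (num + 1) 1).foldl
    (fun cnt i =>
      if (PySem.Int.toStr i).toList.any (fun x => x == '3' || x == '6' || x == '9') then cnt + 1
      else cnt)
    0

-- ===== PORT B =====
-- Source B's ok(n): the while loop checking n % 10 against (3,6,9); exact for n : Nat (n ≥ 0)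
def okNum (n : Nat) : Bool :=
  if n = 0 then true
  else if n % 10 == 3 || n % 10 == 6 || n % 10 == 9 then false
  else okNum (n / 10)
decreasing_by exact Nat.div_lt_self (Nat.pos_of_ne_zero (by assumption)) (by norm_num)

-- Source B's DIGITS tuple
def bDigits : List Nat := [0, 1, 2, 4, 5, 7, 8]

-- Source B's count_ok(n): numbers in [0,n] with only digits from DIGITS (n ≥ 0 always in Source B)
def countOk (n : Nat) : Int :=
  if n < 10 then (bDigits.countP (fun d => d ≤ n) : Int)
  else countOk (n / 10 - 1) * 7 +
    (if okNum (n / 10) then (bDigits.countP (fun d => d ≤ n % 10) : Int) else 0)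
decreasing_by
  have _h10 : 10 ≤ n := Nat.le_of_not_lt (by assumption)
  have : n / 10 < n := Nat.div_lt_self (by omega) (by norm_num)
  omega


def solution_alt (num : Int) : Int :=
  if num < 1 then 0 else num - (countOk num.toNat - 1)

-- ===== PRECONDITION & SPEC =====
def Spec_solution (num : Int) (out : Int) : Prop := out = solution_alt num
instance (num : Int) (out : Int) : Decidable (Spec_solution num out) := by unfold Spec_solution; infer_instance

-- ===== CLAIM (what is proved, stated in full; the proofs are below) =====
def Claim_equal_solution : Prop := ∀ (num : Int), Dom_solution num → Spec_solution num (solution num)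

-- ===== LEMMAS AND PROOFS =====

-- big-endian decimal digit characters of n, the shape Nat.toDigits 10 produces
def digChars (n : Nat) : List Char :=
  if n < 10 then [Nat.digitChar n]
  else digChars (n / 10) ++ [Nat.digitChar (n % 10)]
decreasing_by exact Nat.div_lt_self (by omega) (by norm_num)

lemma toDigitsCore_eq_digChars :
    ∀ (fuel n : Nat) (acc : List Char), n < fuel →
      Nat.toDigitsCore 10 fuel n acc = digChars n ++ acc := by
  intro fuel
  induction fuel with
  | zero => intro n acc h; omega
  | succ f ih =>
    intro n acc h
    rw [Nat.toDigitsCore]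
    by_cases h0 : n / 10 = 0
    · have hn10 : n < 10 := by omega
      simp [h0, digChars, hn10, Nat.mod_eq_of_lt hn10]
    · have hge : 10 ≤ n := by
        by_contra hc
        exact h0 (Nat.div_eq_of_lt (by omega))
      have hlt : n / 10 < f := by
        have : n / 10 < n := Nat.div_lt_self (by omega) (by norm_num)
        omega
      rw [if_neg h0, ih _ _ hlt]
      conv_rhs => rw [digChars]
      rw [if_neg (show ¬ n < 10 by omega)]
      simp

lemma toDigits_eq_digChars (n : Nat) : Nat.toDigits 10 n = digChars n := by
  have := toDigitsCore_eq_digChars (n + 1) n [] (by omega)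
  simpa [Nat.toDigits] using this

lemma digitChar_bad (d : Nat) (hd : d < 10) :
    (Nat.digitChar d == '3' || Nat.digitChar d == '6' || Nat.digitChar d == '9')
      = (d == 3 || d == 6 || d == 9) := by
  interval_cases d <;> decide

-- okNum unfolded as a conjunction, for n ≥ 1
lemma okNum_step (n : Nat) (h : 1 ≤ n) :
    okNum n = (!(n % 10 == 3 || n % 10 == 6 || n % 10 == 9) && okNum (n / 10)) := by
  rw [okNum, if_neg (by omega)]
  by_cases hb : (n % 10 == 3 || n % 10 == 6 || n % 10 == 9) = true <;> simp [hb]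

-- string scan = arithmetic scan
lemma digChars_any_eq (n : Nat) :
    (digChars n).any (fun x => x == '3' || x == '6' || x == '9') = !okNum n := by
  induction n using Nat.strong_induction_on with
  | _ n ih =>
    by_cases h : n < 10
    · rw [digChars, if_pos h]
      simp only [List.any_cons, List.any_nil, Bool.or_false]
      rw [digitChar_bad n h, okNum]
      by_cases h0 : n = 0
      · subst h0; decide
      · rw [if_neg h0, Nat.mod_eq_of_lt h]
        by_cases hb : (n == 3 || n == 6 || n == 9) = true
        · simp [hb]
        · rw [if_neg hb, okNum, if_pos (Nat.div_eq_of_lt h)]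
          simp [hb]
    · rw [digChars, if_neg h]
      have hq : n / 10 < n := Nat.div_lt_self (by omega) (by norm_num)
      rw [List.any_append]
      simp only [List.any_cons, List.any_nil, Bool.or_false]
      rw [digitChar_bad _ (Nat.mod_lt _ (by norm_num)), ih _ hq]
      rw [okNum_step n (by omega)]
      by_cases hb : (n % 10 == 3 || n % 10 == 6 || n % 10 == 9) = true <;> simp [hb]

lemma countOk_zero : countOk 0 = 1 := by rw [countOk]; decide

-- the step identity: countOk counts one more exactly when n itself avoids 3/6/9
lemma countOk_succ : ∀ n : Nat, 1 ≤ n →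
    countOk n = countOk (n - 1) + (if okNum n then 1 else 0) := by
  intro n
  induction n using Nat.strong_induction_on with
  | _ n ih =>
    intro h1
    by_cases hsmall : n < 10
    · interval_cases n <;> simp [countOk, okNum, bDigits]
    · have h10 : 10 ≤ n := by omega
      set q := n / 10 with hq
      set r := n % 10 with hr
      have hq1 : 1 ≤ q := by have := Nat.div_le_div_right (c := 10) h10; simpa [hq] using this
      have hrlt : r < 10 := Nat.mod_lt _ (by norm_num)
      have hn : n = 10 * q + r := by rw [hq, hr]; omega
      by_cases hr0 : r = 0
      · -- n = 10*q, n-1 = 10*(q-1)+9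
        have hok : okNum n = okNum q := by
          rw [okNum_step n (by omega), ← hr, hr0, ← hq]; simp
        by_cases hq10 : q = 1
        · -- n = 10 concretely
          have hn10 : n = 10 := by omega
          subst hn10
          have hok1 : okNum 1 = true := by simp [okNum]
          have hok10 : okNum 10 = true := by simp [okNum]
          have h9 : countOk 9 = 7 := by rw [countOk]; decide
          have h10v : countOk 10 = 8 := by
            rw [countOk]
            norm_num [countOk_zero, hok1, bDigits]
          rw [show (10 : Nat) - 1 = 9 from rfl, h10v, h9, hok10]
          norm_num
        · have hq2 : 2 ≤ q := by omega
          have hn20 : 20 ≤ n := by omega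
          have hm : n - 1 = 10 * (q - 1) + 9 := by omega
          have hmq : (n - 1) / 10 = q - 1 := by omega
          have hmr : (n - 1) % 10 = 9 := by omega
          conv_lhs => rw [countOk]
          rw [if_neg (show ¬ n < 10 by omega), ← hq, ← hr, hr0]
          conv_rhs => rw [countOk]
          rw [if_neg (show ¬ n - 1 < 10 by omega), hmq, hmr]
          have hIH : countOk (q - 1) = countOk (q - 1 - 1) + (if okNum (q-1) then 1 else 0) :=
            ih (q - 1) (by omega) (by omega)
          have hc9 : (bDigits.countP (fun d => d ≤ 9) : Int) = 7 := by decide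
          have hc0 : (bDigits.countP (fun d => d ≤ 0) : Int) = 1 := by decide
          rw [hc9, hc0, hok, hIH]
          by_cases ho1 : okNum (q - 1) = true <;> by_cases ho2 : okNum q = true <;>
            simp [ho1, ho2] <;> ring
      · -- r ≥ 1: n-1 has same q, last digit r-1
        have hm : n - 1 = 10 * q + (r - 1) := by omega
        have hmq : (n - 1) / 10 = q := by omega
        have hmr : (n - 1) % 10 = r - 1 := by omega
        conv_lhs => rw [countOk]
        rw [if_neg (show ¬ n < 10 by omega), ← hq, ← hr]
        conv_rhs => rw [countOk]
        rw [if_neg (show ¬ n - 1 < 10 by omega), hmq, hmr]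
        have hok : okNum n = (!(r == 3 || r == 6 || r == 9) && okNum q) := by
          rw [okNum_step n (by omega), ← hr, ← hq]
        have hr1 : 1 ≤ r := by omega
        have hcr : (bDigits.countP (fun d => d ≤ r) : Int)
            = bDigits.countP (fun d => d ≤ r - 1) + (if (r == 3 || r == 6 || r == 9) then 0 else 1) := by
          interval_cases r <;> decide
        rw [hok, hcr]
        by_cases hb : (r == 3 || r == 6 || r == 9) = true <;> by_cases ho : okNum q = true <;>
          simp [hb, ho] <;> ring

-- the A-side loop body test equals ¬ okNum, for positive i
lemma bodyTest_eq (i : Int) (h : 1 ≤ i) :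
    (PySem.Int.toStr i).toList.any (fun x => x == '3' || x == '6' || x == '9') = !okNum i.toNat := by
  rw [PySem.Int.toList_toStr, PySem.Int.toChars, if_neg (by omega), toDigits_eq_digChars,
    digChars_any_eq]

-- the loop computed up to bound n
lemma loop_eq : ∀ n : Nat,
    (PySem.List.pyRange 1 ((n : Int) + 1) 1).foldl
      (fun cnt i =>
        if (PySem.Int.toStr i).toList.any (fun x => x == '3' || x == '6' || x == '9') then cnt + 1
        else cnt) 0
    = (n : Int) - (countOk n - 1) := by
  intro n
  induction n with
  | zero => rw [PySem.List.pyRange_one_eq_nil (by norm_num)]; simp [countOk_zero]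
  | succ m ih =>
    have hsplit : PySem.List.pyRange 1 ((m : Int) + 1 + 1) 1
        = PySem.List.pyRange 1 ((m : Int) + 1) 1 ++ [(m : Int) + 1] := by
      exact PySem.List.pyRange_one_succ_right (by omega)
    push_cast
    rw [hsplit, List.foldl_append, ih]
    simp only [List.foldl_cons, List.foldl_nil]
    rw [bodyTest_eq ((m : Int) + 1) (by omega)]
    have ht : ((m : Int) + 1).toNat = m + 1 := by omega
    rw [ht, countOk_succ (m + 1) (by omega)]
    simp only [Nat.add_sub_cancel]
    by_cases ho : okNum (m + 1) = true <;> simp [ho] <;> ring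

-- ===== VERDICT (by name: the statement is the Claim_ definition above) =====
theorem solution_spec : Claim_equal_solution := by
  intro num _
  unfold Spec_solution solution solution_alt
  by_cases h : num < 1
  · rw [PySem.List.pyRange_one_eq_nil (by omega), if_pos h]
    simp
  · rw [if_neg h]
    have hn : num = (num.toNat : Int) := by omega
    rw [hn] at *
    exact loop_eq num.toNat
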